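-- pv_equiv track=rewrite | github.com/gmggroup/omf-python | notebooks/z_order_utils.py | get_pointer
-- ===== SOURCE A (Python) =====
-- dimension = 3 # Always in 3D
--
-- level_bits = 3 # Enough for eight refinements
--
-- max_bits = 8 # max necessary per integer, enough for UInt32
--
-- def bitrange(x, width, start, end):
--     """
--         Extract a bit range as an integer.
--         (start, end) is inclusive lower bound, exclusive upper bound.
--     """
--     return x >> (width - end) & ((2 ** (end - start)) - 1)
--
-- def get_pointer(index):
--     level = index & (2 ** level_bits - 1)
--     index = index >> level_bits
--
--     pointer = [0] * dimension
--     iwidth = max_bits * dimension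
--     for i in range(iwidth):
--         b = bitrange(index, iwidth, i, i + 1) << (iwidth - i - 1) // dimension
--         pointer[i % dimension] |= b
--     pointer.reverse()
--     return pointer, level
-- ===== SOURCE B (Python) =====
-- def get_pointer(index):
--     level = index & 7
--     index >>= 3
--     pointer = []
--     for j in range(3):
--         d = 2 - j
--         val = 0
--         for k in range(8):
--             bit = (index >> (23 - (3 * k + d))) & 1
--             val |= bit << (7 - k)
--         pointer.append(val)
--     return pointer, level
-- ===== Notes on version B (the rewrite author's own statement) =====
-- stated objective: simpler
-- what changed: Replaces A's single flat pass over the Morton bits that dispatches each Morton bit into pointer[i % 3] of a mutable list (followed by a reverse) with a nested loop that builds each of the three coordinates directly, accumulating its eight bits in order and emitting coordinates already reversed.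
import Mathlib
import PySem

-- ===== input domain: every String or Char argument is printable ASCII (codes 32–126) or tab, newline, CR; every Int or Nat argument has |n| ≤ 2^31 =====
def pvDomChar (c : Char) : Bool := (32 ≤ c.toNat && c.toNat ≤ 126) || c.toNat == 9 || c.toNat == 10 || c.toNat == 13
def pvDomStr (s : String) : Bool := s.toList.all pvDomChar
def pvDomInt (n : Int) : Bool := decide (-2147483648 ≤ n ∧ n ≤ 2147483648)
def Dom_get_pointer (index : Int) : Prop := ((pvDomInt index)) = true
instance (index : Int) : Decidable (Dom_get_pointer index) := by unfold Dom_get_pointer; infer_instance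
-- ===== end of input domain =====

-- B builds each of the three coordinates directly with a per-dimension inner bit loop
-- instead of A's single 24-bit pass dispatching by i % 3 into a mutable list; objective: simpler.

-- ===== PORT A =====
def bitrange (x width start stop : Int) : Int :=
  PySem.Int.band (x >>> (width - stop).toNat) ((2:Int) ^ (stop - start).toNat - 1)

def get_pointer (index : Int) : List Int × Int :=
  let level := PySem.Int.band index ((2:Int) ^ 3 - 1)
  let index := index >>> (3:Nat)
  let pointer : List Int := List.replicate 3 0
  let iwidth : Int := 8 * 3
  let pointer := (PySem.List.pyRange 0 iwidth 1).foldl (fun ptr i =>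
    let b := bitrange index iwidth i (i + 1) <<< (PySem.Int.floordiv (iwidth - i - 1) 3).toNat
    PySem.List.pySetD ptr (PySem.Int.mod i 3)
      (PySem.Int.bor (PySem.List.pyGetD ptr (PySem.Int.mod i 3) 0) b)) pointer
  (pointer.reverse, level)

-- ===== PORT B =====
def get_pointer_alt (index : Int) : List Int × Int :=
  let level := PySem.Int.band index 7
  let index := index >>> (3:Nat)
  let pointer := (PySem.List.pyRange 0 3 1).foldl (fun acc j =>
    let d := 2 - j
    let val := (PySem.List.pyRange 0 8 1).foldl (fun val k =>
      let bit := PySem.Int.band (index >>> ((23 - (3 * k + d) : Int)).toNat) 1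
      PySem.Int.bor val (bit <<< ((7 - k : Int)).toNat)) 0
    acc ++ [val]) []
  (pointer, level)

-- ===== PRECONDITION & SPEC =====
def Spec_get_pointer (index : Int) (out : List Int × Int) : Prop := out = get_pointer_alt index
instance (index : Int) (out : List Int × Int) : Decidable (Spec_get_pointer index out) := by unfold Spec_get_pointer; infer_instance

-- ===== CLAIM (what is proved, stated in full; the proofs are below) =====
def Claim_equal_get_pointer : Prop := ∀ (index : Int), Dom_get_pointer index → Spec_get_pointer index (get_pointer index)

-- ===== LEMMAS AND PROOFS =====

-- A's single pass over all Morton bits, dispatching bit i into slot i % 3, equals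
-- three independent per-slot accumulations, one per slot.
theorem triA (f : Int → Int) (n : Nat) (a b c : Int) :
    (PySem.List.pyRange 0 (3*(n:Int)) 1).foldl (fun ptr i =>
        PySem.List.pySetD ptr (PySem.Int.mod i 3)
          (PySem.Int.bor (PySem.List.pyGetD ptr (PySem.Int.mod i 3) 0) (f i))) [a,b,c]
    = [(PySem.List.pyRange 0 (n:Int) 1).foldl (fun v k => PySem.Int.bor v (f (3*k))) a,
       (PySem.List.pyRange 0 (n:Int) 1).foldl (fun v k => PySem.Int.bor v (f (3*k+1))) b,
       (PySem.List.pyRange 0 (n:Int) 1).foldl (fun v k => PySem.Int.bor v (f (3*k+2))) c] := by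
  induction n generalizing a b c with
  | zero => simp [PySem.List.pyRange_one_eq_nil]
  | succ n ih =>
    have h3 : (3*((n+1:Nat):Int)) = (3*(n:Int)+1+1) + 1 := by push_cast; ring
    have h1 : (3*(n:Int)+1+1) = (3*(n:Int)+1) + 1 := by ring
    have hn : ((n+1:Nat):Int) = ((n:Nat):Int) + 1 := by push_cast; ring
    rw [h3, PySem.List.pyRange_one_succ_right (by positivity),
        h1, PySem.List.pyRange_one_succ_right (by positivity),
        PySem.List.pyRange_one_succ_right (by positivity),
        List.foldl_append, List.foldl_append, List.foldl_append, ih,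
        hn, PySem.List.pyRange_one_succ_right (Int.natCast_nonneg n)]
    simp only [List.foldl_append, List.foldl_cons, List.foldl_nil]
    rw [show PySem.Int.mod (3*(n:Int)) 3 = 0 from by
          rw [PySem.Int.mod_eq_emod_of_pos (by norm_num)]; omega,
        show PySem.Int.mod (3*(n:Int)+1) 3 = 1 from by
          rw [PySem.Int.mod_eq_emod_of_pos (by norm_num)]; omega,
        show PySem.Int.mod (3*(n:Int)+1+1) 3 = 2 from by
          rw [PySem.Int.mod_eq_emod_of_pos (by norm_num)]; omega]
    simp [PySem.List.pySetD_of_nonneg, PySem.List.pyGetD_of_nonneg, List.set]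
    ring_nf

-- one Morton bit of A, rewritten as B extracts and places it
theorem ptw (x k d : Int) (hd0 : 0 ≤ d) (hd : d ≤ 2) :
    bitrange x 24 (3*k+d) (3*k+d+1) <<< (PySem.Int.floordiv (24 - (3*k+d) - 1) 3).toNat
    = PySem.Int.band (x >>> ((23 - (3*k+d) : Int)).toNat) 1 <<< ((7-k : Int)).toNat := by
  rw [show PySem.Int.floordiv (24 - (3*k+d) - 1) 3 = 7 - k from
        (PySem.Int.floordiv_eq_iff_of_pos (by norm_num)).mpr (by omega)]
  simp only [bitrange]
  rw [show (24 - (3*k+d+1) : Int) = 23 - (3*k+d) from by ring,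
      show ((3*k+d+1) - (3*k+d) : Int) = 1 from by ring]
  norm_num

theorem get_pointer_eq_alt (index : Int) : get_pointer index = get_pointer_alt index := by
  simp only [get_pointer, get_pointer_alt]
  rw [show ((2:Int)^3 - 1) = 7 from by norm_num,
      show List.replicate 3 (0:Int) = [0,0,0] from rfl,
      show ((8:Int)*3) = 24 from by norm_num]
  have h := triA (fun i => bitrange (index >>> (3:Nat)) 24 i (i+1) <<<
      (PySem.Int.floordiv (24 - i - 1) 3).toNat) 8 0 0 0
  rw [show (3*(((8:Nat)):Int)) = 24 from by norm_num] at h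
  rw [show (((8:Nat)):Int) = (8:Int) from by norm_num] at h
  rw [h, show PySem.List.pyRange 0 3 1 = [0,1,2] from by decide]
  simp only [List.foldl_cons, List.foldl_nil, List.nil_append, List.cons_append,
    List.reverse_cons, List.reverse_nil, Prod.mk.injEq, List.cons.injEq, and_true]
  rw [show ((2:Int) - 0) = 2 from by norm_num, show ((2:Int) - 1) = 1 from by norm_num,
      show ((2:Int) - 2) = 0 from by norm_num]
  refine ⟨?_, ?_, ?_⟩
  · apply PySem.List.foldl_congr_mem
    intro acc k _
    exact congrArg (PySem.Int.bor acc) (ptw _ k 2 (by norm_num) (by norm_num))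
  · apply PySem.List.foldl_congr_mem
    intro acc k _
    exact congrArg (PySem.Int.bor acc) (ptw _ k 1 (by norm_num) (by norm_num))
  · apply PySem.List.foldl_congr_mem
    intro acc k _
    have e := ptw (index >>> (3:Nat)) k 0 (le_refl 0) (by norm_num)
    rw [show ((3:Int)*k + 0) = 3*k from by ring] at e
    rw [show ((3:Int)*k + 0) = 3*k from by ring]
    exact congrArg (PySem.Int.bor acc) e

-- ===== VERDICT (by name: the statement is the Claim_ definition above) =====
theorem get_pointer_spec : Claim_equal_get_pointer := by
  intro index _
  unfold Spec_get_pointer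
  exact get_pointer_eq_alt index
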